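-- pv_equiv track=rewrite | github.com/stormychel/App-Store-Connect-CLI | scripts/check_website_commands.py | tokens_are_root_only_invocation
-- ===== SOURCE A (Python) =====
-- def tokens_are_root_only_invocation(
--     tokens: tuple[str, ...],
--     root_flags: dict[str, bool],
-- ) -> bool:
--     pending_value = False
--     for token in tokens:
--         if pending_value:
--             pending_value = False
--             continue
--         if token == "--help":
--             continue
--         if not token.startswith("--"):
--             return False
--         flag = token.split("=", 1)[0]
--         if flag not in root_flags:
--             return False
--         pending_value = "=" not in token and not root_flags[flag]
--     return not pending_value
-- ===== SOURCE B (Python) =====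
-- def tokens_are_root_only_invocation(
--     tokens: tuple[str, ...],
--     root_flags: dict[str, bool],
-- ) -> bool:
--     # Stage 1: classify every token independently of its neighbours.
--     SELF, NEEDS, BAD = 0, 1, 2
--
--     def classify(token: str) -> int:
--         if token == "--help":
--             return SELF
--         if not token.startswith("--"):
--             return BAD
--         flag = token.split("=", 1)[0]
--         if flag not in root_flags:
--             return BAD
--         if "=" not in token and not root_flags[flag]:
--             return NEEDS
--         return SELF
--
--     kinds = [classify(t) for t in tokens]
--
--     # Stage 2: match the kind sequence against the grammar (SELF | NEEDS any)*.
--     def matches(ks: list[int]) -> bool: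
--         if not ks:
--             return True
--         if ks[0] == SELF:
--             return matches(ks[1:])
--         if ks[0] == NEEDS:
--             return len(ks) >= 2 and matches(ks[2:])
--         return False
--
--     return matches(kinds)
-- ===== Notes on version B (the rewrite author's own statement) =====
-- stated objective: alternative
-- what changed: Replaced A's single stateful scan (pending_value flag with early returns) by a two-stage pipeline: first classify every token independently into self-contained / needs-a-value / invalid, then match the resulting kind list against the grammar (SELF | NEEDS any)* by structural recursion.
import Mathlib
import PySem

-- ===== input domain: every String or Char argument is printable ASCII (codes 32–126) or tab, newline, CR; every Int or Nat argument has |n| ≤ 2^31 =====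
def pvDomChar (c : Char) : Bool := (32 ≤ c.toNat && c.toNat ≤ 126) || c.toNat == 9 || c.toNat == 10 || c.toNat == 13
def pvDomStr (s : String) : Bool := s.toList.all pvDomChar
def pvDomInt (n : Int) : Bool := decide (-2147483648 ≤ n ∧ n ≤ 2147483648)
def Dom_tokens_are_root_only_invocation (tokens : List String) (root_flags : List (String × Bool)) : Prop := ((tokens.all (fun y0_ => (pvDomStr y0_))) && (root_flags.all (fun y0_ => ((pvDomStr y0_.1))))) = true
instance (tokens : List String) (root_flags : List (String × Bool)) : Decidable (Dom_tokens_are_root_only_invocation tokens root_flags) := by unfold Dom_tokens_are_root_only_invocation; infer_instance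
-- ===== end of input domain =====

-- B replaces A's single stateful scan (pending_value flag, early returns) by a
-- two-stage pipeline: classify each token independently, then match the kind
-- list against the grammar (SELF | NEEDS any)*; objective: alternative decomposition.

-- ===== PORT A =====
-- token.split("=", 1)[0]
def pvFlagOf (t : String) : String :=
  ((PySem.Str.splitMax? t "=" 1).getD []).headD ""

-- the for-loop of A, carrying pending_value
def pvLoopA (d : PySem.Dict String Bool) : List String → Bool → Bool
  | [], pending => !pending
  | t :: ts, pending =>
    if pending then pvLoopA d ts false
    else if t == "--help" then pvLoopA d ts pending
    else if !(PySem.Str.startswith t "--") then false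
    else
      let flag := pvFlagOf t
      if !(d.contains flag) then false
      else pvLoopA d ts (!(PySem.Str.isIn "=" t) && !(d.getD flag false))

def tokens_are_root_only_invocation (tokens : List String) (root_flags : List (String × Bool)) : Bool :=
  pvLoopA (PySem.Dict.mk root_flags) tokens false

-- ===== PORT B =====
-- stage 1: classify one token (0 = SELF, 1 = NEEDS a value, 2 = BAD)
def pvClassify (d : PySem.Dict String Bool) (t : String) : Nat :=
  if t == "--help" then 0
  else if !(PySem.Str.startswith t "--") then 2
  else
    let flag := pvFlagOf t
    if !(d.contains flag) then 2
    else if !(PySem.Str.isIn "=" t) && !(d.getD flag false) then 1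
    else 0

-- stage 2: match the kind list against (SELF | NEEDS any)*
def pvMatches : List Nat → Bool
  | [] => true
  | k :: ks =>
    if k = 0 then pvMatches ks
    else if k = 1 then
      match ks with
      | [] => false
      | _ :: rest => pvMatches rest
    else false

def tokens_are_root_only_invocation_alt (tokens : List String) (root_flags : List (String × Bool)) : Bool :=
  pvMatches (tokens.map (pvClassify (PySem.Dict.mk root_flags)))

-- ===== PRECONDITION & SPEC =====
def Spec_tokens_are_root_only_invocation (tokens : List String) (root_flags : List (String × Bool)) (out : Bool) : Prop := out = tokens_are_root_only_invocation_alt tokens root_flags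
instance (tokens : List String) (root_flags : List (String × Bool)) (out : Bool) : Decidable (Spec_tokens_are_root_only_invocation tokens root_flags out) := by unfold Spec_tokens_are_root_only_invocation; infer_instance

-- ===== CLAIM (what is proved, stated in full; the proofs are below) =====
def Claim_equal_tokens_are_root_only_invocation : Prop := ∀ (tokens : List String) (root_flags : List (String × Bool)), Dom_tokens_are_root_only_invocation tokens root_flags → Spec_tokens_are_root_only_invocation tokens root_flags (tokens_are_root_only_invocation tokens root_flags)

-- ===== LEMMAS AND PROOFS =====

-- unfolding lemmas for the matcher
theorem pvMatches_nil : pvMatches [] = true := rfl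
theorem pvMatches_cons0 (ks : List Nat) : pvMatches (0 :: ks) = pvMatches ks := by rw [pvMatches.eq_def]; simp
theorem pvMatches_cons1_nil : pvMatches [1] = false := by rw [pvMatches]; simp
theorem pvMatches_cons1 (r : Nat) (ks : List Nat) : pvMatches (1 :: r :: ks) = pvMatches ks := by rw [pvMatches]; simp
theorem pvMatches_cons2 (ks : List Nat) : pvMatches (2 :: ks) = false := by rw [pvMatches.eq_def]; simp

-- A skips the token after a pending flag without examining it
theorem pvLoopA_pending (d : PySem.Dict String Bool) (r : String) (ts : List String) :
    pvLoopA d (r :: ts) true = pvLoopA d ts false := by rw [pvLoopA]; simp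

-- key invariant: A's loop with pending_value = False equals B's matcher on the
-- classification of the remaining tokens (fuel k bounds the list length)
theorem pvLoopA_eq_matches (d : PySem.Dict String Bool) :
    ∀ k (ts : List String), ts.length ≤ k →
      pvLoopA d ts false = pvMatches (ts.map (pvClassify d)) := by
  intro k
  induction k with
  | zero =>
    intro ts h
    have : ts = [] := List.eq_nil_of_length_eq_zero (by omega)
    simp [this, pvLoopA, pvMatches_nil]
  | succ k ih =>
    intro ts h
    cases ts with
    | nil => simp [pvLoopA, pvMatches_nil]
    | cons t rest =>
      have hlen : rest.length ≤ k := by simp at h; omega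
      rw [pvLoopA]
      by_cases hh : t == "--help"
      · simp [pvClassify, hh, pvMatches_cons0, ih rest hlen]
      · by_cases hs : PySem.Chars.startswith t.toList ['-','-']
        · by_cases hc : (d.contains (pvFlagOf t)) = true
          · by_cases hv : PySem.Chars.isIn ['='] t.toList = false ∧ d.getD (pvFlagOf t) false = false
            · -- NEEDS a value: A sets pending; B's matcher consumes one more token
              cases rest with
              | nil =>
                simp [pvClassify, hh, PySem.Str.startswith, hs, hc, hv,
                  pvMatches_cons1_nil, pvLoopA, PySem.Str.isIn]
              | cons r rest2 =>
                have hlen2 : rest2.length ≤ k := by simp at h; omega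
                simp [pvClassify, hh, PySem.Str.startswith, hs, hc, hv.1, hv.2,
                  pvMatches_cons1, PySem.Str.isIn, pvLoopA_pending, ih rest2 hlen2]
            · have hv' : (!(PySem.Chars.isIn ['='] t.toList) && !(d.getD (pvFlagOf t) false)) = false := by
                rcases Bool.eq_false_or_eq_true (PySem.Chars.isIn ['='] t.toList) with h1 | h1 <;>
                  rcases Bool.eq_false_or_eq_true (d.getD (pvFlagOf t) false) with h2 | h2 <;>
                  simp_all
              simp [pvClassify, hh, PySem.Str.startswith, hs, hc, hv',
                pvMatches_cons0, PySem.Str.isIn, ih rest hlen]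
          · simp only [Bool.not_eq_true] at hc
            simp [pvClassify, hh, PySem.Str.startswith, hs, hc, pvMatches_cons2]
        · have hs' : PySem.Chars.startswith t.toList ['-','-'] = false := by simpa using hs
          simp [pvClassify, hh, PySem.Str.startswith, hs', pvMatches_cons2]

-- ===== VERDICT (by name: the statement is the Claim_ definition above) =====
theorem tokens_are_root_only_invocation_spec : Claim_equal_tokens_are_root_only_invocation := by
  intro tokens root_flags _
  unfold Spec_tokens_are_root_only_invocation tokens_are_root_only_invocation tokens_are_root_only_invocation_alt
  exact pvLoopA_eq_matches _ tokens.length tokens (by omega)
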